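-- pv_equiv track=rewrite | github.com/981377660LMT/algorithm-study | 17_模式匹配/马拉车拉马/LongestPalindromes.py | longestPalindromes
-- ===== SOURCE A (Python) =====
-- from typing import List, Tuple
--
-- INF = int(1e18)
--
-- def longestPalindromes(ords: List[int]) -> List[Tuple[int, int]]:
--     """
--     给定一个字符串，返回极长回文子串的区间.这样的极长回文子串最多有 2n-1 个.
--     """
--     n = len(ords)
--     m = n * 2 - 1
--     sb = [0] * m
--     for i in range(n - 1, -1, -1):
--         sb[i * 2] = ords[i]
--     for i in range(n - 1):
--         sb[i * 2 + 1] = INF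
--     dp = [0] * m
--     i, j = 0, 0
--     while i < m:
--         while i - j >= 0 and i + j < m and sb[i - j] == sb[i + j]:
--             j += 1
--         dp[i] = j
--         k = 1
--         while i - k >= 0 and i + k < m and k + dp[i - k] < j:
--             dp[i + k] = dp[i - k]
--             k += 1
--         i += k
--         j -= k
--     for i in range(m):
--         if ((i ^ dp[i]) & 1) == 0:
--             dp[i] -= 1
--     res = []
--     for i in range(m):
--         if dp[i] == 0:
--             continue
--         start = (i - dp[i] + 1) // 2
--         end = (i + dp[i] + 1) // 2
--         res.append((start, end))
--     return res
-- ===== SOURCE B (Python) =====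
-- from typing import List, Tuple
--
-- def longestPalindromes(ords: List[int]) -> List[Tuple[int, int]]:
--     """Same result as A, by direct center expansion over the 2n-1 centers."""
--     n = len(ords)
--     res = []
--     for c in range(2 * n - 1):
--         if c % 2 == 0:
--             l = r = c // 2
--         else:
--             l, r = (c + 1) // 2, (c - 1) // 2
--         while l - 1 >= 0 and r + 1 < n and ords[l - 1] == ords[r + 1]:
--             l -= 1
--             r += 1
--         if l <= r:
--             res.append((l, r + 1))
--     return res
-- ===== Notes on version B (the rewrite author's own statement) =====
-- stated objective: simpler
-- what changed: Replaces Manacher's algorithm on the INF-interleaved transformed array (mirror reuse, jump of the center, parity post-adjustment of the radius array) by a plain expansion around each of the 2n-1 centers directly on the input list, emitting each maximal interval immediately.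
import Mathlib
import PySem

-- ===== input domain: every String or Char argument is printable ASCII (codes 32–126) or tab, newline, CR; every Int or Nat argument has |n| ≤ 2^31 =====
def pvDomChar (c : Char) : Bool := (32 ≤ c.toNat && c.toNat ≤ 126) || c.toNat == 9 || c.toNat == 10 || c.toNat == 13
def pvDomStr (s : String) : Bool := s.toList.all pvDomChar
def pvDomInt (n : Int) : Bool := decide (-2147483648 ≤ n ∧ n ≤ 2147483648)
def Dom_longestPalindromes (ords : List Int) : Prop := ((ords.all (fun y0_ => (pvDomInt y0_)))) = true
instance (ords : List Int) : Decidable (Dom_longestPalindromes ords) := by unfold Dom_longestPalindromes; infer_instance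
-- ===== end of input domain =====

-- B replaces A's Manacher algorithm (INF-interleaved array, mirror reuse, parity post-adjustment)
-- by a plain expansion around each of the 2n-1 centers directly on the input: simpler, not faster.

-- ===== PORT A =====
def pvINF : Int := 1000000000000000000

-- inner `while i - j >= 0 and i + j < m and sb[i - j] == sb[i + j]: j += 1` (indices stay nonneg: `i - j >= 0` is `j ≤ i`)
-- (the loop is written with a structural fuel argument, always called with enough fuel — m steps —
-- so the fuel-0 branch is never reached and the loop is Python's)
def pvExpandA (sb : List Int) (m i : Nat) : Nat → Nat → Nat
  | 0, j => j
  | fuel + 1, j =>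
    if j ≤ i ∧ i + j < m ∧ sb.getD (i - j) 0 = sb.getD (i + j) 0 then
      pvExpandA sb m i fuel (j + 1)
    else j

-- inner `k = 1; while i - k >= 0 and i + k < m and k + dp[i - k] < j: dp[i + k] = dp[i - k]; k += 1`
def pvCopyA (m i j : Nat) : Nat → List Nat → Nat → Nat × List Nat
  | 0, dp, k => (k, dp)
  | fuel + 1, dp, k =>
    if k ≤ i ∧ i + k < m ∧ k + dp.getD (i - k) 0 < j then
      pvCopyA m i j fuel (dp.set (i + k) (dp.getD (i - k) 0)) (k + 1)
    else (k, dp)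

-- outer `while i < m` loop of A; `j -= k` never goes below 0 in Python (k ≤ j on every reachable state),
-- so Nat subtraction is exact there
def pvOuterA (sb : List Int) (m : Nat) : Nat → Nat → Nat → List Nat → List Nat
  | 0, _, _, dp => dp
  | fuel + 1, i, j, dp =>
    if i < m then
      let j1 := pvExpandA sb m i m j
      let kd := pvCopyA m i j1 m (dp.set i j1) 1
      pvOuterA sb m fuel (i + kd.1) (j1 - kd.1) kd.2
    else dp

-- `sb = [0]*m; for i in range(n-1,-1,-1): sb[i*2] = ords[i]; for i in range(n-1): sb[i*2+1] = INF`
-- (loop indices i are 0 ≤ i < n, so `.toNat` and `pyGetD` are exact for `ords[i]` / `sb[...] =`)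
def pvSbA (ords : List Int) : List Int :=
  let n := ords.length
  let m := 2 * n - 1
  let sb1 := (PySem.List.pyRange ((n : Int) - 1) (-1) (-1)).foldl
    (fun sb i => sb.set (2 * i).toNat (PySem.List.pyGetD ords i 0)) (List.replicate m 0)
  (PySem.List.pyRange 0 ((n : Int) - 1) 1).foldl
    (fun sb i => sb.set (2 * i + 1).toNat pvINF) sb1

-- `(i ^ dp[i]) & 1` is ported literally on Nat (dp values are nonnegative throughout);
-- `List.range m` = Python `range(m)` (for n = 0 both are empty); `//` is PySem.Int.floordiv
def longestPalindromes (ords : List Int) : List (Int × Int) :=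
  let n := ords.length
  let m := 2 * n - 1
  let sb := pvSbA ords
  let dp := pvOuterA sb m m 0 0 (List.replicate m 0)
  let dp2 := (List.range m).foldl
    (fun d i => if (i ^^^ (d.getD i 0).toNat) &&& 1 = 0 then d.set i (d.getD i 0 - 1) else d)
    (dp.map Int.ofNat)
  (List.range m).foldl
    (fun res i =>
      let di := dp2.getD i 0
      if di = 0 then res
      else res ++ [(PySem.Int.floordiv ((i : Int) - di + 1) 2, PySem.Int.floordiv ((i : Int) + di + 1) 2)])
    []

-- ===== PORT B =====
-- `while l - 1 >= 0 and r + 1 < n and ords[l-1] == ords[r+1]: l -= 1; r += 1`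
-- (l, r stay in [0, n), so `getD` is exact for `ords[...]`)
-- (structural fuel = the left index l, which the loop decrements: never exhausted before the guard fails)
def pvExpB (ords : List Int) (n : Nat) : Nat → Nat → Nat → Nat × Nat
  | 0, l, r => (l, r)
  | fuel + 1, l, r =>
    if 1 ≤ l ∧ r + 1 < n ∧ ords.getD (l - 1) 0 = ords.getD (r + 1) 0 then
      pvExpB ords n fuel (l - 1) (r + 1)
    else (l, r)

def longestPalindromes_alt (ords : List Int) : List (Int × Int) :=
  let n := ords.length
  (List.range (2 * n - 1)).foldl
    (fun res c =>
      let p := if c % 2 = 0 then (c / 2, c / 2) else ((c + 1) / 2, (c - 1) / 2)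
      let lr := pvExpB ords n p.1 p.1 p.2
      if lr.1 ≤ lr.2 then res ++ [((lr.1 : Int), (lr.2 : Int) + 1)] else res)
    []

-- ===== PRECONDITION & SPEC =====
def Spec_longestPalindromes (ords : List Int) (out : List (Int × Int)) : Prop := out = longestPalindromes_alt ords
instance (ords : List Int) (out : List (Int × Int)) : Decidable (Spec_longestPalindromes ords out) := by unfold Spec_longestPalindromes; infer_instance

-- ===== CLAIM (what is proved, stated in full; the proofs are below) =====
def Claim_equal_longestPalindromes : Prop := ∀ (ords : List Int), Dom_longestPalindromes ords → Spec_longestPalindromes ords (longestPalindromes ords)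

-- ===== LEMMAS AND PROOFS =====

-- the returned k of A's copy loop never shrinks
theorem pvCopyA_fst_ge (m i j fuel : Nat) (dp : List Nat) (k : Nat) :
    k ≤ (pvCopyA m i j fuel dp k).1 := by
  fun_induction pvCopyA <;> omega

-- the transformed array as a function: even positions hold ords, odd positions the INF separator
def sbF (ords : List Int) (p : Nat) : Int := if p % 2 = 0 then ords.getD (p / 2) 0 else pvINF

-- the match condition of A's expansion loop at offset t from center i
def mC (ords : List Int) (m i t : Nat) : Prop :=
  t ≤ i ∧ i + t < m ∧ sbF ords (i - t) = sbF ords (i + t)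

-- A's expansion re-expressed over sbF
def radAux (ords : List Int) (m i j : Nat) : Nat :=
  if h : j ≤ i ∧ i + j < m ∧ sbF ords (i - j) = sbF ords (i + j) then radAux ords m i (j + 1) else j
termination_by m - (i + j)
decreasing_by omega

-- the palindrome radius at center i in the transformed array
def radF (ords : List Int) (m i : Nat) : Nat := radAux ords m i 0

theorem radAux_eq (ords : List Int) (m i : Nat) (x j : Nat) (hjx : j ≤ x)
    (hall : ∀ t, j ≤ t → t < x → mC ords m i t) (hx : ¬ mC ords m i x) :
    radAux ords m i j = x := by
  fun_induction radAux ords m i j with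
  | case1 j h ih =>
    have hjx' : j + 1 ≤ x := by
      rcases Nat.lt_or_ge j x with h' | h'
      · omega
      · have : j = x := by omega
        exact absurd (this ▸ h) hx
    exact ih hjx' (fun t h1 h2 => hall t (by omega) h2)
  | case2 j h =>
    rcases Nat.lt_or_ge j x with h' | h'
    · exact absurd (hall j le_rfl h') h
    · omega

theorem rad_matches (ords : List Int) (m i t : Nat) (ht : t < radF ords m i) : mC ords m i t := by
  unfold radF at ht
  have : ∀ j, j ≤ t → t < radAux ords m i j → mC ords m i t := by
    intro j
    fun_induction radAux ords m i j with
    | case1 j h ih =>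
      intro hjt hlt
      rcases Nat.eq_or_lt_of_le hjt with rfl | h'
      · exact h
      · exact ih h' hlt
    | case2 j h => intro hjt hlt; omega
  exact this 0 (Nat.zero_le _) ht

theorem rad_fail (ords : List Int) (m i : Nat) : ¬ mC ords m i (radF ords m i) := by
  unfold radF
  have : ∀ j, ¬ mC ords m i (radAux ords m i j) := by
    intro j
    fun_induction radAux ords m i j with
    | case1 j h ih => exact ih
    | case2 j h => exact h
  exact this 0

theorem rad_ge (ords : List Int) (m i v : Nat) (h : ∀ t, t < v → mC ords m i t) :
    v ≤ radF ords m i := by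
  by_contra hc
  exact rad_fail ords m i (h _ (by omega))

theorem rad_le (ords : List Int) (m i v : Nat) (h : ¬ mC ords m i v) : radF ords m i ≤ v := by
  by_contra hc
  exact h (rad_matches ords m i v (by omega))

theorem rad_le_i (ords : List Int) (m i : Nat) : radF ords m i ≤ i + 1 := by
  exact rad_le ords m i (i + 1) (fun h => by obtain ⟨h1, -, -⟩ := h; omega)

theorem rad_le_m (ords : List Int) (m i : Nat) : radF ords m i ≤ m - i := by
  exact rad_le ords m i (m - i) (fun h => by obtain ⟨h1, h2, -⟩ := h; omega)

theorem mirror (ords : List Int) (m i t : Nat) (ht : t < radF ords m i) :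
    sbF ords (i - t) = sbF ords (i + t) := (rad_matches ords m i t ht).2.2

theorem radAux_eq_of_le (ords : List Int) (m i j : Nat) (hj : j ≤ radF ords m i) :
    radAux ords m i j = radF ords m i :=
  radAux_eq ords m i _ j hj (fun t _ ht => rad_matches ords m i t ht) (rad_fail ords m i)

theorem expandA_eq_radAux (ords sb : List Int) (m i fuel j : Nat)
    (hsb : ∀ p, p < m → sb.getD p 0 = sbF ords p) :
    m ≤ i + j + fuel → pvExpandA sb m i fuel j = radAux ords m i j := by
  induction fuel generalizing j with
  | zero =>
    intro hfuel
    conv_rhs => rw [radAux]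
    rw [dif_neg (fun hc => by omega)]
    rfl
  | succ fuel ih =>
    intro hfuel
    show (if j ≤ i ∧ i + j < m ∧ sb.getD (i - j) 0 = sb.getD (i + j) 0 then
        pvExpandA sb m i fuel (j + 1) else j) = radAux ords m i j
    by_cases h : j ≤ i ∧ i + j < m ∧ sb.getD (i - j) 0 = sb.getD (i + j) 0
    · rw [if_pos h, ih (j + 1) (by omega)]
      conv_rhs => rw [radAux]
      rw [dif_pos ⟨h.1, h.2.1, by
        rw [← hsb (i - j) (by omega), ← hsb (i + j) (by omega)]; exact h.2.2⟩]
    · rw [if_neg h]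
      conv_rhs => rw [radAux]
      rw [dif_neg (fun hc => h ⟨hc.1, hc.2.1, by
        rw [hsb (i - j) (by omega), hsb (i + j) (by omega)]; exact hc.2.2⟩)]

-- cross-mirror: positions i+k-t and i-k+t agree when |k-t| < radF
theorem mirror_cross (ords : List Int) (m i k t : Nat) (hk : k ≤ i) (ht : t ≤ i - k)
    (hlt : k + t < radF ords m i) :
    sbF ords (i + k - t) = sbF ords (i - k + t) := by
  rcases Nat.lt_or_ge k t with h | h
  · have hm := mirror ords m i (t - k) (by omega)
    have e1 : i - (t - k) = i + k - t := by omega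
    have e2 : i + (t - k) = i - k + t := by omega
    rw [e1, e2] at hm
    exact hm
  · have hm := mirror ords m i (k - t) (by omega)
    have e1 : i - (k - t) = i - k + t := by omega
    have e2 : i + (k - t) = i + k - t := by omega
    rw [e1, e2] at hm
    exact hm.symm

theorem rad_ge_mirror (ords : List Int) (m i k : Nat) (h1 : 1 ≤ k) (hk : k ≤ i) (him : i + k < m) :
    min (radF ords m (i - k)) (radF ords m i - k) ≤ radF ords m (i + k) := by
  apply rad_ge
  intro t ht
  have htk : t < radF ords m (i - k) := by omega
  have htr : k + t < radF ords m i := by omega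
  have hti : t ≤ i - k := by have := rad_le_i ords m (i - k); omega
  refine ⟨by omega, by have := rad_le_m ords m i; omega, ?_⟩
  have e1 := mirror ords m i (k + t) htr
  have e2 := mirror ords m (i - k) t htk
  have e3 := mirror_cross ords m i k t hk hti htr
  have g1 : i + k - t = i + k - t := rfl
  calc sbF ords (i + k - t) = sbF ords (i - k + t) := e3
    _ = sbF ords (i - k - t) := e2.symm
    _ = sbF ords (i - (k + t)) := by rw [show i - k - t = i - (k + t) from by omega]
    _ = sbF ords (i + (k + t)) := e1
    _ = sbF ords (i + k + t) := by rw [show i + (k + t) = i + k + t from by omega]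

theorem rad_copy (ords : List Int) (m i k : Nat) (h1 : 1 ≤ k) (hk : k ≤ i)
    (hin : radF ords m (i - k) + k < radF ords m i) :
    radF ords m (i + k) = radF ords m (i - k) := by
  have hle_m := rad_le_m ords m i
  have hle_i := rad_le_i ords m i
  have hikm : i + k < m := by omega
  have hge := rad_ge_mirror ords m i k h1 hk hikm
  have hmin : min (radF ords m (i - k)) (radF ords m i - k) = radF ords m (i - k) := by omega
  rw [hmin] at hge
  refine le_antisymm ?_ hge
  apply rad_le
  rintro ⟨hb1, hb2, heq⟩
  have hfail := rad_fail ords m (i - k)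
  have hRk_le : radF ords m (i - k) ≤ i - k := by omega
  have hbm : (i - k) + radF ords m (i - k) < m := by omega
  apply hfail
  refine ⟨hRk_le, hbm, ?_⟩
  have e1 := mirror ords m i (k + radF ords m (i - k)) (by omega)
  have e3 := mirror_cross ords m i k (radF ords m (i - k)) hk hRk_le (by omega)
  calc sbF ords (i - k - radF ords m (i - k))
      = sbF ords (i - (k + radF ords m (i - k))) := by
        rw [show i - k - radF ords m (i - k) = i - (k + radF ords m (i - k)) from by omega]
    _ = sbF ords (i + (k + radF ords m (i - k))) := e1
    _ = sbF ords (i + k + radF ords m (i - k)) := by rw [Nat.add_assoc]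
    _ = sbF ords (i + k - radF ords m (i - k)) := heq.symm
    _ = sbF ords (i - k + radF ords m (i - k)) := e3

theorem getD_set_self {α : Type} (l : List α) (i : Nat) (v d : α) (h : i < l.length) :
    (l.set i v).getD i d = v := by
  simp [List.getD_eq_getElem?_getD, h]

theorem getD_set_ne {α : Type} (l : List α) (i j : Nat) (v d : α) (h : i ≠ j) :
    (l.set i v).getD j d = l.getD j d := by
  simp [List.getD_eq_getElem?_getD, List.getElem?_set_ne h]

theorem pvCopyA_correct (ords : List Int) (m i j1 fuel : Nat) (dp : List Nat) (k : Nat) :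
    m ≤ k + fuel → dp.length = m → i < m → 1 ≤ k → j1 = radF ords m i →
    (∀ t, t < i + k → dp.getD t 0 = radF ords m t) →
    (pvCopyA m i j1 fuel dp k).2.length = m ∧
    (∀ t, t < i + (pvCopyA m i j1 fuel dp k).1 → (pvCopyA m i j1 fuel dp k).2.getD t 0 = radF ords m t) ∧
    (i + (pvCopyA m i j1 fuel dp k).1 < m →
      j1 - (pvCopyA m i j1 fuel dp k).1 ≤ radF ords m (i + (pvCopyA m i j1 fuel dp k).1)) := by
  fun_induction pvCopyA m i j1 fuel dp k with
  | case1 dp k =>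
    intro hfuel hm hi hk hj1 hlow
    exact ⟨hm, fun t ht => hlow t ht, fun him => by omega⟩
  | case2 fuel dp k h ih =>
    intro hfuel hm hi hk hj1 hlow
    have hval : dp.getD (i - k) 0 = radF ords m (i - k) := hlow (i - k) (by omega)
    have hcopy : radF ords m (i + k) = radF ords m (i - k) := by
      apply rad_copy ords m i k hk h.1
      have h22 := h.2.2
      rw [hval, hj1] at h22
      omega
    apply ih (by omega) (by simp [hm]) hi (by omega) hj1
    intro t ht
    rcases eq_or_ne t (i + k) with rfl | hne
    · rw [getD_set_self _ _ _ _ (by omega), hcopy, hval]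
    · rw [getD_set_ne _ _ _ _ _ (Ne.symm hne)]
      exact hlow t (by omega)
  | case3 fuel dp k h =>
    intro hfuel hm hi hk hj1 hlow
    dsimp only
    refine ⟨hm, fun t ht => hlow t ht, ?_⟩
    intro him
    rcases Nat.lt_or_ge i k with hik | hik
    · have := rad_le_i ords m i
      omega
    · have h3 : ¬ (k + dp.getD (i - k) 0 < j1) := fun hc => h ⟨hik, him, hc⟩
      rw [hlow (i - k) (by omega)] at h3
      have hgm := rad_ge_mirror ords m i k hk hik him
      subst hj1
      omega

theorem pvOuterA_correct (ords sb : List Int) (m fuel i j : Nat) (dp : List Nat)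
    (hsb : ∀ p, p < m → sb.getD p 0 = sbF ords p) :
    m ≤ i + fuel → dp.length = m → (∀ t, t < i → dp.getD t 0 = radF ords m t) →
    (i < m → j ≤ radF ords m i) →
    (pvOuterA sb m fuel i j dp).length = m ∧
    ∀ t, t < m → (pvOuterA sb m fuel i j dp).getD t 0 = radF ords m t := by
  fun_induction pvOuterA sb m fuel i j dp with
  | case1 i j dp =>
    intro hfuel hm hlow hj
    exact ⟨hm, fun t ht => hlow t (by omega)⟩
  | case2 fuel i j dp h j1 kd ih =>
    intro hfuel hm hlow hj
    have hj1 : pvExpandA sb m i m j = radF ords m i := by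
      rw [expandA_eq_radAux ords sb m i m j hsb (by omega)]
      exact radAux_eq_of_le ords m i j (hj h)
    have hlow1 : ∀ t, t < i + 1 → (dp.set i (pvExpandA sb m i m j)).getD t 0 = radF ords m t := by
      intro t ht
      rcases eq_or_ne t i with rfl | hne
      · rw [getD_set_self _ _ _ _ (by omega), hj1]
      · rw [getD_set_ne _ _ _ _ _ (Ne.symm hne)]
        exact hlow t (by omega)
    have hcc := pvCopyA_correct ords m i (pvExpandA sb m i m j) m (dp.set i (pvExpandA sb m i m j)) 1
      (by omega) (by simp [hm]) h le_rfl hj1 hlow1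
    have hk1 : 1 ≤ kd.1 := pvCopyA_fst_ge m i (pvExpandA sb m i m j) m
      (dp.set i (pvExpandA sb m i m j)) 1
    exact ih (by omega) hcc.1 (fun t ht => hcc.2.1 t ht) hcc.2.2
  | case3 fuel i j dp h =>
    intro hfuel hm hlow hj
    exact ⟨hm, fun t ht => hlow t (by omega)⟩

-- ---- the built list sb realizes sbF ----

theorem foldl_set_length {α : Type} (L : List α) (f : α → Nat) (v : α → Int) (s : List Int) :
    (L.foldl (fun s a => s.set (f a) (v a)) s).length = s.length := by
  induction L generalizing s with
  | nil => rfl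
  | cons a L ih => simpa [List.foldl] using ih (s.set (f a) (v a))

theorem foldl_set_getD_ne {α : Type} (L : List α) (f : α → Nat) (v : α → Int) (s : List Int)
    (q : Nat) (h : ∀ a ∈ L, f a ≠ q) :
    (L.foldl (fun s a => s.set (f a) (v a)) s).getD q 0 = s.getD q 0 := by
  induction L generalizing s with
  | nil => rfl
  | cons a L ih =>
    simp only [List.foldl]
    rw [ih _ (fun b hb => h b (List.mem_cons_of_mem a hb))]
    exact getD_set_ne _ _ _ _ _ (h a List.mem_cons_self)

theorem foldl_set_getD_mem {α : Type} [DecidableEq α] (L : List α) (f : α → Nat) (v : α → Int)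
    (s : List Int) (q : Nat) (hnd : L.Nodup) (a : α) (ha : a ∈ L) (hfa : f a = q)
    (huniq : ∀ b ∈ L, f b = q → b = a) (hq : q < s.length) :
    (L.foldl (fun s a => s.set (f a) (v a)) s).getD q 0 = v a := by
  induction L generalizing s with
  | nil => exact absurd ha (List.not_mem_nil)
  | cons b L ih =>
    simp only [List.foldl]
    rcases eq_or_ne b a with rfl | hne
    · have hnotin : b ∉ L := (List.nodup_cons.mp hnd).1
      rw [foldl_set_getD_ne _ _ _ _ _ (fun c hc hfc => hnotin (by
        have := huniq c (List.mem_cons_of_mem b hc) hfc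
        exact this ▸ hc))]
      rw [← hfa]
      exact getD_set_self _ _ _ _ (by rw [hfa]; exact hq)
    · have ha' : a ∈ L := by
        rcases List.mem_cons.mp ha with rfl | h'
        · exact absurd rfl hne
        · exact h'
      exact ih _ (List.nodup_cons.mp hnd).2 ha'
        (fun c hc hfc => huniq c (List.mem_cons_of_mem b hc) hfc)
        (by simpa using hq)

theorem sb_getD (ords : List Int) (p : Nat) (hp : p < 2 * ords.length - 1) :
    (pvSbA ords).getD p 0 = sbF ords p := by
  simp only [pvSbA]
  rw [PySem.List.pyRange_neg_one, PySem.List.pyRange_one, List.foldl_map, List.foldl_map]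
  rw [show ((ords.length : Int) - 1 - (-1)).toNat = ords.length from by omega]
  rw [show (((ords.length : Int) - 1) - 0).toNat = ords.length - 1 from by omega]
  rcases Nat.even_or_odd p with ⟨u, hu⟩ | ⟨u, hu⟩
  · -- even position: untouched by the INF loop, set by the ords loop
    have hun : u ≤ ords.length - 1 := by omega
    rw [foldl_set_getD_ne _ _ _ _ _ (fun a ha hfa => by
      have ha' := List.mem_range.mp ha
      have : (2 * (0 + (a : Int)) + 1).toNat = 2 * a + 1 := by omega
      omega)]
    rw [foldl_set_getD_mem _ _ _ _ _ (List.nodup_range) (ords.length - 1 - u)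
      (List.mem_range.mpr (by omega))
      (by omega)
      (fun b hb hfb => by
        have hb' := List.mem_range.mp hb
        have : (2 * ((ords.length : Int) - 1 - (b : Int))).toNat = 2 * (ords.length - 1 - b) := by omega
        omega)
      (by rw [List.length_replicate]; omega)]
    rw [show (ords.length : Int) - 1 - ((ords.length - 1 - u : Nat) : Int) = (u : Int) from by omega]
    rw [PySem.List.pyGetD_natCast]
    simp only [sbF]
    rw [if_pos (by omega), show p / 2 = u from by omega]
  · -- odd position: set to INF by the second loop
    have hun : u < ords.length - 1 := by omega
    rw [foldl_set_getD_mem _ _ _ _ _ (List.nodup_range) u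
      (List.mem_range.mpr (by omega))
      (by omega)
      (fun b hb hfb => by
        have hb' := List.mem_range.mp hb
        have : (2 * (0 + (b : Int)) + 1).toNat = 2 * b + 1 := by omega
        omega)
      (by rw [foldl_set_length, List.length_replicate]; omega)]
    simp only [sbF]
    rw [if_neg (by omega)]

-- ---- the parity post-adjustment ----

def adjF (t : Nat) (v : Int) : Int := if (t ^^^ v.toNat) &&& 1 = 0 then v - 1 else v

theorem xor_and_one (a b : Nat) : ((a ^^^ b) &&& 1 = 0) ↔ a % 2 = b % 2 := by
  simp [Nat.and_one_is_mod]
  omega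

theorem adjust_length (d0 : List Int) (L : List Nat) :
    (L.foldl
      (fun d i => if (i ^^^ (d.getD i 0).toNat) &&& 1 = 0 then d.set i (d.getD i 0 - 1) else d)
      d0).length = d0.length := by
  induction L generalizing d0 with
  | nil => rfl
  | cons a L ih =>
    simp only [List.foldl]
    split
    · rw [ih]; simp
    · rw [ih]

theorem adjust_getD (d0 : List Int) (M : Nat) (hM : M ≤ d0.length) (t : Nat) :
    ((List.range M).foldl
      (fun d i => if (i ^^^ (d.getD i 0).toNat) &&& 1 = 0 then d.set i (d.getD i 0 - 1) else d)
      d0).getD t 0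
    = if t < M then adjF t (d0.getD t 0) else d0.getD t 0 := by
  induction M generalizing t with
  | zero => simp
  | succ M ih =>
    rw [List.range_succ, List.foldl_append]
    simp only [List.foldl]
    have ihM : ∀ t, _ := fun t => ih (by omega) t
    have hlen : ((List.range M).foldl
        (fun d i => if (i ^^^ (d.getD i 0).toNat) &&& 1 = 0 then d.set i (d.getD i 0 - 1) else d)
        d0).length = d0.length := adjust_length d0 (List.range M)
    have hMv : ((List.range M).foldl
        (fun d i => if (i ^^^ (d.getD i 0).toNat) &&& 1 = 0 then d.set i (d.getD i 0 - 1) else d)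
        d0).getD M 0 = d0.getD M 0 := by
      rw [ihM M, if_neg (by omega)]
    rcases eq_or_ne t M with rfl | hne
    · have hcond : (((t ^^^ (((List.range t).foldl
          (fun d i => if (i ^^^ (d.getD i 0).toNat) &&& 1 = 0 then d.set i (d.getD i 0 - 1) else d)
          d0).getD t 0).toNat) &&& 1 = 0)) ↔ ((t ^^^ (d0.getD t 0).toNat) &&& 1 = 0) := by
        rw [hMv]
      rw [if_pos (show t < t + 1 from by omega)]
      unfold adjF
      by_cases hc : (t ^^^ (d0.getD t 0).toNat) &&& 1 = 0
      · rw [if_pos (hcond.mpr hc), if_pos hc, hMv, getD_set_self _ _ _ _ (by rw [hlen]; omega)]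
      · rw [if_neg (fun hx => hc (hcond.mp hx)), if_neg hc, ihM t, if_neg (by omega)]
    · have : (if t < M + 1 then adjF t (d0.getD t 0) else d0.getD t 0)
          = if t < M then adjF t (d0.getD t 0) else d0.getD t 0 := by
        rcases Nat.lt_or_ge t M with h' | h'
        · rw [if_pos (by omega), if_pos h']
        · rw [if_neg (by omega), if_neg (by omega)]
      rw [this, ← ihM t]
      rw [hMv]
      split
      · exact getD_set_ne _ _ _ _ _ (Ne.symm hne)
      · rfl

-- ---- B's expansion: characterisation ----

theorem expB_le (ords : List Int) (n fuel l r : Nat) : (pvExpB ords n fuel l r).1 ≤ l := by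
  fun_induction pvExpB <;> omega

theorem expB_sum (ords : List Int) (n fuel l r : Nat) :
    (pvExpB ords n fuel l r).1 + (pvExpB ords n fuel l r).2 = l + r := by
  fun_induction pvExpB <;> omega

theorem expB_fail (ords : List Int) (n fuel l r : Nat) (hfuel : l ≤ fuel) :
    ¬ (1 ≤ (pvExpB ords n fuel l r).1 ∧ (pvExpB ords n fuel l r).2 + 1 < n ∧
       ords.getD ((pvExpB ords n fuel l r).1 - 1) 0 = ords.getD ((pvExpB ords n fuel l r).2 + 1) 0) := by
  induction fuel generalizing l r with
  | zero =>
    rintro ⟨c1, -, -⟩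
    revert c1
    show ¬ 1 ≤ (pvExpB ords n 0 l r).1
    show ¬ 1 ≤ l
    omega
  | succ fuel ih =>
    by_cases h : 1 ≤ l ∧ r + 1 < n ∧ ords.getD (l - 1) 0 = ords.getD (r + 1) 0
    · have hred : pvExpB ords n (fuel + 1) l r = pvExpB ords n fuel (l - 1) (r + 1) := by
        show (if 1 ≤ l ∧ _ ∧ _ then _ else _) = _
        rw [if_pos h]
      rw [hred]
      exact ih (l - 1) (r + 1) (by omega)
    · have hred : pvExpB ords n (fuel + 1) l r = (l, r) := by
        show (if 1 ≤ l ∧ _ ∧ _ then _ else _) = _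
        rw [if_neg h]
      rw [hred]
      exact h

theorem expB_step (ords : List Int) (n fuel l r : Nat) (a : Nat) :
    (pvExpB ords n fuel l r).1 < a → a ≤ l →
    1 ≤ a ∧ (l + r - a) + 1 < n ∧ ords.getD (a - 1) 0 = ords.getD (l + r - a + 1) 0 := by
  induction fuel generalizing l r with
  | zero =>
    intro h1 h2
    have : (pvExpB ords n 0 l r).1 = l := rfl
    omega
  | succ fuel ih =>
    intro h1 h2
    by_cases h : 1 ≤ l ∧ r + 1 < n ∧ ords.getD (l - 1) 0 = ords.getD (r + 1) 0
    · have hred : pvExpB ords n (fuel + 1) l r = pvExpB ords n fuel (l - 1) (r + 1) := by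
        show (if 1 ≤ l ∧ _ ∧ _ then _ else _) = _
        rw [if_pos h]
      rcases eq_or_ne a l with rfl | hne
      · exact ⟨h.1, by rw [show a + r - a = r from by omega]; exact h.2.1,
          by rw [show a + r - a + 1 = r + 1 from by omega]; exact h.2.2⟩
      · have hstep := ih (l - 1) (r + 1) (by rw [← hred]; exact h1) (by omega)
        rw [show l - 1 + (r + 1) = l + r from by omega] at hstep
        exact hstep
    · have hred : pvExpB ords n (fuel + 1) l r = (l, r) := by
        show (if 1 ≤ l ∧ _ ∧ _ then _ else _) = _
        rw [if_neg h]
      rw [hred] at h1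
      omega

-- ---- per-center comparison ----

theorem center_even (ords : List Int) (p : Nat) (hp : 2 * p < 2 * ords.length - 1) :
    2 * (p - (pvExpB ords ords.length p p p).1) + 1 ≤ radF ords (2 * ords.length - 1) (2 * p) ∧
    radF ords (2 * ords.length - 1) (2 * p) ≤ 2 * (p - (pvExpB ords ords.length p p p).1) + 2 ∧
    (pvExpB ords ords.length p p p).1 ≤ p ∧
    (pvExpB ords ords.length p p p).2 = 2 * p - (pvExpB ords ords.length p p p).1 := by
  have hL := expB_le ords ords.length p p p
  have hsum := expB_sum ords ords.length p p p
  have hfail := expB_fail ords ords.length p p p le_rfl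
  refine ⟨?_, ?_, hL, by omega⟩
  · apply rad_ge
    intro t ht
    have hb2 : 2 * p + t < 2 * ords.length - 1 := by
      by_cases hLp : (pvExpB ords ords.length p p p).1 = p
      · have : t = 0 := by omega
        omega
      · have hstep := expB_step ords ords.length p p p ((pvExpB ords ords.length p p p).1 + 1)
          (by omega) (by omega)
        omega
    refine ⟨by omega, hb2, ?_⟩
    rcases Nat.even_or_odd t with ⟨s, hs⟩ | ⟨s, hs⟩
    · unfold sbF
      rw [if_pos (by omega), if_pos (by omega)]
      rcases eq_or_ne s 0 with rfl | hs0
      · rw [show 2 * p - t = 2 * p + t from by omega]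
      · have hstep := expB_step ords ords.length p p p (p - s + 1) (by omega) (by omega)
        rw [show (2 * p - t) / 2 = p - s + 1 - 1 from by omega,
            show (2 * p + t) / 2 = p + p - (p - s + 1) + 1 from by omega]
        exact hstep.2.2
    · unfold sbF
      rw [if_neg (by omega), if_neg (by omega)]
  · apply rad_le
    rintro ⟨c1, c2, c3⟩
    by_cases hL1 : 1 ≤ (pvExpB ords ords.length p p p).1
    · by_cases hR : (pvExpB ords ords.length p p p).2 + 1 < ords.length
      · have hne : ords.getD ((pvExpB ords ords.length p p p).1 - 1) 0
            ≠ ords.getD ((pvExpB ords ords.length p p p).2 + 1) 0 :=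
          fun he => hfail ⟨hL1, hR, he⟩
        apply hne
        unfold sbF at c3
        rw [if_pos (by omega), if_pos (by omega)] at c3
        rw [show (pvExpB ords ords.length p p p).1 - 1
              = (2 * p - (2 * (p - (pvExpB ords ords.length p p p).1) + 2)) / 2 from by omega,
            show (pvExpB ords ords.length p p p).2 + 1
              = (2 * p + (2 * (p - (pvExpB ords ords.length p p p).1) + 2)) / 2 from by omega]
        exact c3
      · omega
    · omega

theorem center_odd (ords : List Int) (q : Nat) (hq : 2 * q + 1 < 2 * ords.length - 1) :
    2 * (q + 1 - (pvExpB ords ords.length (q + 1) (q + 1) q).1) ≤ radF ords (2 * ords.length - 1) (2 * q + 1) ∧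
    radF ords (2 * ords.length - 1) (2 * q + 1) ≤ 2 * (q + 1 - (pvExpB ords ords.length (q + 1) (q + 1) q).1) + 1 ∧
    (pvExpB ords ords.length (q + 1) (q + 1) q).1 ≤ q + 1 ∧
    (pvExpB ords ords.length (q + 1) (q + 1) q).2 = 2 * q + 1 - (pvExpB ords ords.length (q + 1) (q + 1) q).1 := by
  have hL := expB_le ords ords.length (q + 1) (q + 1) q
  have hsum := expB_sum ords ords.length (q + 1) (q + 1) q
  have hfail := expB_fail ords ords.length (q + 1) (q + 1) q le_rfl
  refine ⟨?_, ?_, hL, by omega⟩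
  · apply rad_ge
    intro t ht
    have hstep1 := expB_step ords ords.length (q + 1) (q + 1) q ((pvExpB ords ords.length (q + 1) (q + 1) q).1 + 1)
      (by omega) (by omega)
    refine ⟨by omega, by omega, ?_⟩
    rcases Nat.even_or_odd t with ⟨s, hs⟩ | ⟨s, hs⟩
    · unfold sbF
      rw [if_neg (by omega), if_neg (by omega)]
    · unfold sbF
      rw [if_pos (by omega), if_pos (by omega)]
      have hstep := expB_step ords ords.length (q + 1) (q + 1) q (q + 1 - s) (by omega) (by omega)
      rw [show (2 * q + 1 - t) / 2 = q + 1 - s - 1 from by omega,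
          show (2 * q + 1 + t) / 2 = (q + 1) + q - (q + 1 - s) + 1 from by omega]
      exact hstep.2.2
  · apply rad_le
    rintro ⟨c1, c2, c3⟩
    by_cases hL1 : 1 ≤ (pvExpB ords ords.length (q + 1) (q + 1) q).1
    · by_cases hR : (pvExpB ords ords.length (q + 1) (q + 1) q).2 + 1 < ords.length
      · have hne : ords.getD ((pvExpB ords ords.length (q + 1) (q + 1) q).1 - 1) 0
            ≠ ords.getD ((pvExpB ords ords.length (q + 1) (q + 1) q).2 + 1) 0 :=
          fun he => hfail ⟨hL1, hR, he⟩
        apply hne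
        unfold sbF at c3
        rw [if_pos (by omega), if_pos (by omega)] at c3
        rw [show (pvExpB ords ords.length (q + 1) (q + 1) q).1 - 1
              = (2 * q + 1 - (2 * (q + 1 - (pvExpB ords ords.length (q + 1) (q + 1) q).1) + 1)) / 2 from by omega,
            show (pvExpB ords ords.length (q + 1) (q + 1) q).2 + 1
              = (2 * q + 1 + (2 * (q + 1 - (pvExpB ords ords.length (q + 1) (q + 1) q).1) + 1)) / 2 from by omega]
        exact c3
      · omega
    · omega

-- A's per-center contribution after the dp array is known to hold radF (parity-adjusted)
def emitA (ords : List Int) (c : Nat) : List (Int × Int) :=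
  if adjF c (Int.ofNat (radF ords (2 * ords.length - 1) c)) = 0 then []
  else [(PySem.Int.floordiv ((c : Int) - adjF c (Int.ofNat (radF ords (2 * ords.length - 1) c)) + 1) 2,
         PySem.Int.floordiv ((c : Int) + adjF c (Int.ofNat (radF ords (2 * ords.length - 1) c)) + 1) 2)]

-- B's per-center contribution
def emitF (ords : List Int) (c : Nat) : List (Int × Int) :=
  let p := if c % 2 = 0 then (c / 2, c / 2) else ((c + 1) / 2, (c - 1) / 2)
  let lr := pvExpB ords ords.length p.1 p.1 p.2
  if lr.1 ≤ lr.2 then [((lr.1 : Int), (lr.2 : Int) + 1)] else []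

theorem getD_map_ofNat (l : List Nat) (c : Nat) : (l.map Int.ofNat).getD c 0 = Int.ofNat (l.getD c 0) := by
  induction l generalizing c with
  | nil => rfl
  | cons a l ih =>
    cases c with
    | zero => rfl
    | succ c => simpa using ih c

theorem alt_eq_flatMap (ords : List Int) :
    longestPalindromes_alt ords = (List.range (2 * ords.length - 1)).flatMap (emitF ords) := by
  simp only [longestPalindromes_alt]
  rw [show (fun (res : List (Int × Int)) (c : Nat) =>
      let p := if c % 2 = 0 then (c / 2, c / 2) else ((c + 1) / 2, (c - 1) / 2)
      let lr := pvExpB ords ords.length p.1 p.1 p.2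
      if lr.1 ≤ lr.2 then res ++ [((lr.1 : Int), (lr.2 : Int) + 1)] else res)
      = fun res c => res ++ emitF ords c from funext fun res => funext fun c => by
        simp only [emitF]
        split <;> split <;> simp]
  rw [PySem.List.foldl_append_eq_flatMap, List.nil_append]

theorem a_eq_flatMap (ords : List Int) :
    longestPalindromes ords = (List.range (2 * ords.length - 1)).flatMap (emitA ords) := by
  simp only [longestPalindromes]
  obtain ⟨hlen, hval⟩ := pvOuterA_correct ords (pvSbA ords) (2 * ords.length - 1)
    (2 * ords.length - 1) 0 0
    (List.replicate (2 * ords.length - 1) 0)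
    (fun p hp => sb_getD ords p hp)
    (by omega)
    (by simp)
    (fun t ht => absurd ht (by omega))
    (fun _ => Nat.zero_le _)
  have hlen2 : ((pvOuterA (pvSbA ords) (2 * ords.length - 1) (2 * ords.length - 1) 0 0
      (List.replicate (2 * ords.length - 1) 0)).map Int.ofNat).length = 2 * ords.length - 1 := by
    simpa using hlen
  have hdp2 : ∀ c, c < 2 * ords.length - 1 →
      ((List.range (2 * ords.length - 1)).foldl
        (fun d i => if (i ^^^ (d.getD i 0).toNat) &&& 1 = 0 then d.set i (d.getD i 0 - 1) else d)
        ((pvOuterA (pvSbA ords) (2 * ords.length - 1) (2 * ords.length - 1) 0 0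
          (List.replicate (2 * ords.length - 1) 0)).map Int.ofNat)).getD c 0
      = adjF c (Int.ofNat (radF ords (2 * ords.length - 1) c)) := by
    intro c hc
    rw [adjust_getD _ _ (le_of_eq hlen2.symm) c, if_pos hc, getD_map_ofNat, hval c hc]
  rw [show (fun (res : List (Int × Int)) (i : Nat) =>
      let di := ((List.range (2 * ords.length - 1)).foldl
        (fun d i => if (i ^^^ (d.getD i 0).toNat) &&& 1 = 0 then d.set i (d.getD i 0 - 1) else d)
        ((pvOuterA (pvSbA ords) (2 * ords.length - 1) (2 * ords.length - 1) 0 0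
          (List.replicate (2 * ords.length - 1) 0)).map Int.ofNat)).getD i 0
      if di = 0 then res
      else res ++ [(PySem.Int.floordiv ((i : Int) - di + 1) 2, PySem.Int.floordiv ((i : Int) + di + 1) 2)])
      = fun res i => res ++ (if ((List.range (2 * ords.length - 1)).foldl
        (fun d i => if (i ^^^ (d.getD i 0).toNat) &&& 1 = 0 then d.set i (d.getD i 0 - 1) else d)
        ((pvOuterA (pvSbA ords) (2 * ords.length - 1) (2 * ords.length - 1) 0 0
          (List.replicate (2 * ords.length - 1) 0)).map Int.ofNat)).getD i 0 = 0 then []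
        else [(PySem.Int.floordiv ((i : Int) - ((List.range (2 * ords.length - 1)).foldl
        (fun d i => if (i ^^^ (d.getD i 0).toNat) &&& 1 = 0 then d.set i (d.getD i 0 - 1) else d)
        ((pvOuterA (pvSbA ords) (2 * ords.length - 1) (2 * ords.length - 1) 0 0
          (List.replicate (2 * ords.length - 1) 0)).map Int.ofNat)).getD i 0 + 1) 2,
          PySem.Int.floordiv ((i : Int) + ((List.range (2 * ords.length - 1)).foldl
        (fun d i => if (i ^^^ (d.getD i 0).toNat) &&& 1 = 0 then d.set i (d.getD i 0 - 1) else d)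
        ((pvOuterA (pvSbA ords) (2 * ords.length - 1) (2 * ords.length - 1) 0 0
          (List.replicate (2 * ords.length - 1) 0)).map Int.ofNat)).getD i 0 + 1) 2)])
      from funext fun res => funext fun i => by
        dsimp only
        split <;> simp]
  rw [PySem.List.foldl_append_eq_flatMap, List.nil_append]
  apply List.flatMap_congr
  intro c hc
  have hc' := List.mem_range.mp hc
  rw [hdp2 c hc']
  rfl

theorem per_center (ords : List Int) (c : Nat) (hc : c < 2 * ords.length - 1) :
    emitA ords c = emitF ords c := by
  simp only [emitA, emitF]
  rcases Nat.even_or_odd c with ⟨p, hp⟩ | ⟨q, hq⟩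
  · -- even center
    obtain ⟨h1, h2, h3, h4⟩ := center_even ords p (by omega)
    have hadj : adjF c (Int.ofNat (radF ords (2 * ords.length - 1) c))
        = Int.ofNat (2 * (p - (pvExpB ords ords.length p p p).1) + 1) := by
      have hrad : radF ords (2 * ords.length - 1) c = 2 * (p - (pvExpB ords ords.length p p p).1) + 1
          ∨ radF ords (2 * ords.length - 1) c = 2 * (p - (pvExpB ords ords.length p p p).1) + 2 := by
        rw [show c = 2 * p from by omega]
        omega
      unfold adjF
      rcases hrad with h | h <;> rw [h] <;>
        simp only [Int.ofNat_eq_natCast, Int.toNat_natCast]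
      · rw [if_neg (fun hx => by rw [xor_and_one] at hx; omega)]
      · rw [if_pos (by rw [xor_and_one]; omega)]
        omega
    rw [hadj, if_neg (show ¬ Int.ofNat (2 * (p - (pvExpB ords ords.length p p p).1) + 1) = 0 from by
          simp only [Int.ofNat_eq_natCast]; omega),
        if_pos (show c % 2 = 0 from by omega)]
    dsimp only
    rw [show c / 2 = p from by omega,
        if_pos (show (pvExpB ords ords.length p p p).1 ≤ (pvExpB ords ords.length p p p).2 from by omega)]
    rw [PySem.Int.floordiv_eq_ediv_of_pos (by omega), PySem.Int.floordiv_eq_ediv_of_pos (by omega)]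
    have e1 : ((c : Int) - Int.ofNat (2 * (p - (pvExpB ords ords.length p p p).1) + 1) + 1) / 2
        = ((pvExpB ords ords.length p p p).1 : Int) := by
      simp only [Int.ofNat_eq_natCast]; omega
    have e2 : ((c : Int) + Int.ofNat (2 * (p - (pvExpB ords ords.length p p p).1) + 1) + 1) / 2
        = ((pvExpB ords ords.length p p p).2 : Int) + 1 := by
      simp only [Int.ofNat_eq_natCast]; omega
    rw [e1, e2]
  · -- odd center
    obtain ⟨h1, h2, h3, h4⟩ := center_odd ords q (by omega)
    have hadj : adjF c (Int.ofNat (radF ords (2 * ords.length - 1) c))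
        = Int.ofNat (2 * (q + 1 - (pvExpB ords ords.length (q + 1) (q + 1) q).1)) := by
      have hrad : radF ords (2 * ords.length - 1) c = 2 * (q + 1 - (pvExpB ords ords.length (q + 1) (q + 1) q).1)
          ∨ radF ords (2 * ords.length - 1) c = 2 * (q + 1 - (pvExpB ords ords.length (q + 1) (q + 1) q).1) + 1 := by
        rw [show c = 2 * q + 1 from by omega]
        omega
      unfold adjF
      rcases hrad with h | h <;> rw [h] <;>
        simp only [Int.ofNat_eq_natCast, Int.toNat_natCast]
      · rw [if_neg (fun hx => by rw [xor_and_one] at hx; omega)]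
      · rw [if_pos (by rw [xor_and_one]; omega)]
        omega
    rw [hadj, if_neg (show ¬ c % 2 = 0 from by omega)]
    dsimp only
    rw [show (c + 1) / 2 = q + 1 from by omega, show (c - 1) / 2 = q from by omega]
    by_cases he : (pvExpB ords ords.length (q + 1) (q + 1) q).1 = q + 1
    · rw [if_pos (show Int.ofNat (2 * (q + 1 - (pvExpB ords ords.length (q + 1) (q + 1) q).1)) = 0 from by
            simp only [Int.ofNat_eq_natCast]; omega),
          if_neg (show ¬ (pvExpB ords ords.length (q + 1) (q + 1) q).1 ≤ (pvExpB ords ords.length (q + 1) (q + 1) q).2 from by omega)]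
    · rw [if_neg (show ¬ Int.ofNat (2 * (q + 1 - (pvExpB ords ords.length (q + 1) (q + 1) q).1)) = 0 from by
            simp only [Int.ofNat_eq_natCast]; omega),
          if_pos (show (pvExpB ords ords.length (q + 1) (q + 1) q).1 ≤ (pvExpB ords ords.length (q + 1) (q + 1) q).2 from by omega)]
      rw [PySem.Int.floordiv_eq_ediv_of_pos (by omega), PySem.Int.floordiv_eq_ediv_of_pos (by omega)]
      have e1 : ((c : Int) - Int.ofNat (2 * (q + 1 - (pvExpB ords ords.length (q + 1) (q + 1) q).1)) + 1) / 2
          = ((pvExpB ords ords.length (q + 1) (q + 1) q).1 : Int) := by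
        simp only [Int.ofNat_eq_natCast]; omega
      have e2 : ((c : Int) + Int.ofNat (2 * (q + 1 - (pvExpB ords ords.length (q + 1) (q + 1) q).1)) + 1) / 2
          = ((pvExpB ords ords.length (q + 1) (q + 1) q).2 : Int) + 1 := by
        simp only [Int.ofNat_eq_natCast]; omega
      rw [e1, e2]

-- ===== VERDICT (by name: the statement is the Claim_ definition above) =====
theorem longestPalindromes_spec : Claim_equal_longestPalindromes := by
  unfold Claim_equal_longestPalindromes Spec_longestPalindromes
  intro ords _
  rw [a_eq_flatMap, alt_eq_flatMap]
  exact List.flatMap_congr fun c hc => per_center ords c (List.mem_range.mp hc)
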